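-- pv_equiv track=rewrite | github.com/alexpdev/torrentfile | torrentfile/cli.py | _format_headers
-- ===== SOURCE A (Python) =====
-- def _format_headers(parts: list) -> list:
--     """
--     Format help message section headers.
--
--     Parameters
--     ----------
--     parts : list
--         List of individual lines for help message.
--
--     Returns
--     -------
--     list
--         Input list with formatted section headers.
--     """
--     if parts and parts[0].startswith("usage:"):
--         parts[0] = "Usage\n=====\n  " + parts[0][6:]
--     headings = [i for i in range(len(parts)) if parts[i].endswith(":\n")]
--     for i in headings[::-1]:
--         parts[i] = parts[i][:-2].title()
--         underline = "".join(["\n", "-" * len(parts[i]), "\n"])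
--         parts.insert(i + 1, underline)
--     return parts
-- ===== SOURCE B (Python) =====
-- def _format_headers(parts: list) -> list:
--     """Format help message section headers (single forward pass)."""
--     if parts and parts[0].startswith("usage:"):
--         parts[0] = "Usage\n=====\n  " + parts[0][6:]
--     result = []
--     for line in parts:
--         if line.endswith(":\n"):
--             title = line[:-2].title()
--             result.append(title)
--             result.append("\n" + "-" * len(title) + "\n")
--         else:
--             result.append(line)
--     parts[:] = result
--     return parts
-- ===== Notes on version B (the rewrite author's own statement) =====
-- stated objective: simpler
-- what changed: Replaces the collect-heading-indices-then-insert-in-reverse pass (with index bookkeeping and list.insert shifts) by one forward pass that emits each line, expanding a heading into its title plus underline as it goes, then writes the result back in place.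
import Mathlib
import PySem

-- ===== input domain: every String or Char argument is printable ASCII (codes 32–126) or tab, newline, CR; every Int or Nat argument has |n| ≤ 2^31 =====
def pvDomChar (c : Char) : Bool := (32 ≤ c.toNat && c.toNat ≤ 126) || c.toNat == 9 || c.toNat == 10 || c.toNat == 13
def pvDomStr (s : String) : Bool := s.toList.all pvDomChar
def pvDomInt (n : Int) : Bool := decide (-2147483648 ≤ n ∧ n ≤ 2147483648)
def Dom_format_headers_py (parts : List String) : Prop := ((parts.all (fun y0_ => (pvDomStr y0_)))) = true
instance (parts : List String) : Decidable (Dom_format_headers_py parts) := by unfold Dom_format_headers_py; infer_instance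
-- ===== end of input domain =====

-- B replaces A's collect-indices-then-insert-in-reverse pass by one forward pass that expands each
-- heading line into title + underline as it goes (simpler); both mutate `parts` in place identically.

-- Hand port of Python str.title() (exact on the ASCII domain: a letter is uppercased after a
-- non-cased character and lowercased otherwise; ASCII cased characters are exactly the letters).
def pyTitleGo : Bool → List Char → List Char
  | _, [] => []
  | prevCased, c :: cs =>
    if PySem.Chars.isalpha c then
      (if prevCased then PySem.Chars.lowerChar c else PySem.Chars.upperChar c) :: pyTitleGo true cs
    else c :: pyTitleGo false cs

def pyTitle (s : String) : String := String.ofList (pyTitleGo false s.toList)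

-- "-" * len(t)  (len t ≥ 0, so .toNat is exact)
def dashRepeat (t : String) : String := String.ofList (List.replicate (PySem.Str.len t).toNat '-')

-- ===== PORT A =====
-- parts[i] = parts[i][:-2].title(); parts.insert(i+1, "".join(["\n", "-"*len(parts[i]), "\n"]))
def stepA (acc : List String) (i : Nat) : List String :=
  let t := pyTitle (PySem.Str.slice (acc.getD i "") none (some (-2)))
  let acc := acc.set i t
  PySem.List.insert acc ((i : Int) + 1) ("\n" ++ dashRepeat t ++ "\n")

def format_headers_py (parts : List String) : List String :=
  let parts :=
    if parts ≠ [] ∧ PySem.Str.startswith (parts.getD 0 "") "usage:" = true then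
      parts.set 0 ("Usage\n=====\n  " ++ PySem.Str.slice (parts.getD 0 "") (some 6) none)
    else parts
  let headings := (List.range parts.length).filter
    (fun i => PySem.Str.endswith (parts.getD i "") ":\n")
  headings.reverse.foldl stepA parts

-- ===== PORT B =====
def format_headers_py_alt (parts : List String) : List String :=
  let parts :=
    if parts ≠ [] ∧ PySem.Str.startswith (parts.getD 0 "") "usage:" = true then
      parts.set 0 ("Usage\n=====\n  " ++ PySem.Str.slice (parts.getD 0 "") (some 6) none)
    else parts
  parts.foldl
    (fun result line =>
      if PySem.Str.endswith line ":\n" then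
        let title := pyTitle (PySem.Str.slice line none (some (-2)))
        result ++ [title, "\n" ++ dashRepeat title ++ "\n"]
      else result ++ [line]) []

-- ===== PRECONDITION & SPEC =====
def Spec_format_headers_py (parts : List String) (out : List String) : Prop := out = format_headers_py_alt parts
instance (parts : List String) (out : List String) : Decidable (Spec_format_headers_py parts out) := by unfold Spec_format_headers_py; infer_instance

-- ===== CLAIM (what is proved, stated in full; the proofs are below) =====
def Claim_equal_format_headers_py : Prop := ∀ (parts : List String), Dom_format_headers_py parts → Spec_format_headers_py parts (format_headers_py parts)

-- ===== LEMMAS AND PROOFS =====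

def expandB (line : String) : List String :=
  if PySem.Str.endswith line ":\n" then
    let title := pyTitle (PySem.Str.slice line none (some (-2)))
    [title, "\n" ++ dashRepeat title ++ "\n"]
  else [line]

theorem insert_nat {α : Type} (l : List α) (n : Nat) (v : α) :
    PySem.List.insert l (n : Int) v = l.take n ++ v :: l.drop n := by
  by_cases h : n ≤ l.length
  · exact PySem.List.insert_natCast l n v h
  · rw [List.take_of_length_le (by omega), List.drop_of_length_le (by omega)]
    simp only [PySem.List.insert, PySem.List.sliceIndices]
    have h1 : ¬ ((n : Int) < 0) := by omega
    have h2 : min (n : Int) (l.length : Int) = (l.length : Int) := by omega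
    simp [h1, h2]

theorem stepA_cons (x : String) (acc : List String) (i : Nat) :
    stepA (x :: acc) (i + 1) = x :: stepA acc i := by
  simp only [stepA, List.getD_cons_succ, List.set_cons_succ]
  have h1 : ((i + 1 : Nat) : Int) + 1 = (((i + 2 : Nat)) : Int) := by push_cast; ring
  have h2 : ((i : Nat) : Int) + 1 = (((i + 1 : Nat)) : Int) := by push_cast; ring
  rw [h1, h2, insert_nat, insert_nat]
  simp

theorem foldlA_shift (idxs : List Nat) (x : String) (acc : List String) :
    (idxs.map (· + 1)).foldl stepA (x :: acc) = x :: idxs.foldl stepA acc := by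
  induction idxs generalizing acc with
  | nil => rfl
  | cons i is ih => simp only [List.map_cons, List.foldl_cons, stepA_cons, ih]

theorem loopA_eq (xs : List String) :
    (((List.range xs.length).filter
        (fun i => PySem.Str.endswith (xs.getD i "") ":\n")).reverse).foldl stepA xs
      = xs.flatMap expandB := by
  induction xs with
  | nil => rfl
  | cons x xs ih =>
    have hdec : (List.range (x :: xs).length).filter
        (fun i => PySem.Str.endswith ((x :: xs).getD i "") ":\n")
        = (if PySem.Str.endswith x ":\n" then [0] else [])
          ++ ((List.range xs.length).filter
              (fun i => PySem.Str.endswith (xs.getD i "") ":\n")).map (· + 1) := by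
      rw [List.length_cons, List.range_succ_eq_map, List.filter_cons, List.filter_map]
      by_cases hp : PySem.Chars.endswith x.toList [':', '\n'] = true <;>
        simp [hp, Function.comp_def, Nat.succ_eq_add_one]
    rw [hdec, List.reverse_append, ← List.map_reverse, List.foldl_append, foldlA_shift, ih]
    by_cases hp : PySem.Chars.endswith x.toList [':', '\n'] = true
    · have step0 : stepA (x :: List.flatMap expandB xs) 0
          = expandB x ++ List.flatMap expandB xs := by
        simp only [stepA, List.getD_cons_zero, List.set_cons_zero, expandB]
        rw [show ((0 : Nat) : Int) + 1 = ((1 : Nat) : Int) by norm_num, insert_nat]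
        simp [hp]
      simp [hp, step0]
    · simp [hp, expandB]

theorem loopB_eq (xs : List String) :
    xs.foldl
      (fun result line =>
        if PySem.Str.endswith line ":\n" then
          let title := pyTitle (PySem.Str.slice line none (some (-2)))
          result ++ [title, "\n" ++ dashRepeat title ++ "\n"]
        else result ++ [line]) []
      = xs.flatMap expandB := by
  have hb : (fun (result : List String) (line : String) =>
      if PySem.Str.endswith line ":\n" then
        let title := pyTitle (PySem.Str.slice line none (some (-2)))
        result ++ [title, "\n" ++ dashRepeat title ++ "\n"]
      else result ++ [line])
      = fun result line => result ++ expandB line := by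
    funext result line
    simp only [expandB]
    split <;> rfl
  rw [hb, PySem.List.foldl_append_eq_flatMap]
  simp

-- ===== VERDICT (by name: the statement is the Claim_ definition above) =====
theorem format_headers_py_spec : Claim_equal_format_headers_py := by
  intro parts _
  unfold Spec_format_headers_py format_headers_py format_headers_py_alt
  split_ifs <;> rw [loopA_eq, loopB_eq]
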